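-- pv_equiv track=rewrite | github.com/Flissel/DaveFelix-Coding-Engine | mcp_plugins/servers/grpc_host/task_executor.py | _extract_schema_definition
-- ===== SOURCE A (Python) =====
-- def _extract_schema_definition(lines: list, schema_name: str) -> str:
--     """Extract a schema definition from OpenAPI YAML lines."""
--     capturing = False
--     captured = []
--     indent_level = 0
--
--     for line in lines:
--         stripped = line.strip()
--         if stripped == f"{schema_name}:" and not capturing:
--             # Check it's under schemas section
--             capturing = True
--             indent_level = len(line) - len(line.lstrip())
--             captured.append(line)
--             continue
--
--         if capturing:
--             current_indent = len(line) - len(line.lstrip()) if line.strip() else indent_level + 1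
--             if line.strip() and current_indent <= indent_level:
--                 break
--             captured.append(line)
--
--     return '\n'.join(captured) if captured else ""
-- ===== SOURCE B (Python) =====
-- def _extract_schema_definition(lines: list, schema_name: str) -> str:
--     """Extract a schema definition from OpenAPI YAML lines.
--
--     Index-arithmetic version: compute all header-match indices and all
--     block-terminator indices wholesale (no scanning state, no break),
--     then slice the block out between the first match and the first stop.
--     """
--     header = f"{schema_name}:"
--
--     def indent(line):
--         return len(line) - len(line.lstrip())
--
--     matches = [k for k, line in enumerate(lines) if line.strip() == header]
--     if not matches:
--         return ""
--     i = matches[0]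
--     tail = lines[i + 1:]
--     ind = indent(lines[i])
--     stops = [k for k, line in enumerate(tail) if line.strip() and indent(line) <= ind]
--     j = stops[0] if stops else len(tail)
--     return "\n".join([lines[i]] + tail[:j])
-- ===== Notes on version B (the rewrite author's own statement) =====
-- stated objective: faster
-- what changed: Replaced A's stateful capture loop (capturing flag, break on dedent, header f-string rebuilt and lines re-stripped every iteration) with index arithmetic: the header is built once, two whole-list comprehensions compute all header-match indices and all block-terminator indices, and the block is taken as one slice between the first match and the first stop.
import Mathlib
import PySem

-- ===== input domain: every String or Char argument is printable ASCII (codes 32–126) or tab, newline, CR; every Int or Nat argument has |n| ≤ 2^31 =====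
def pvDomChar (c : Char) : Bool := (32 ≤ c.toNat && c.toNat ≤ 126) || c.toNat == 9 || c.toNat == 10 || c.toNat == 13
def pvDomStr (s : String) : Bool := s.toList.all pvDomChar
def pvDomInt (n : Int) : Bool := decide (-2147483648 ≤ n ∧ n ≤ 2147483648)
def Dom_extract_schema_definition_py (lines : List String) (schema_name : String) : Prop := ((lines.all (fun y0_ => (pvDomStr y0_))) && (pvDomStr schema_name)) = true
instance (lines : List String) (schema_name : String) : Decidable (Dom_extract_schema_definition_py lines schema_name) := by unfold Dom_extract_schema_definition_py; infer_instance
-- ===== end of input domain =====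

-- B replaces A's stateful capture loop with index arithmetic (header built once, match/stop indices
-- by whole-list comprehensions, one slice); measured faster on the generated timing inputs.

-- ===== PORT A =====
-- the single for-loop of A, with its state (capturing, captured, indent_level); returning `captured` models `break`
def pvALoop (header : String) : List String → Bool → List String → Int → List String
  | [], _, captured, _ => captured
  | line :: rest, capturing, captured, indent_level =>
    if PySem.Str.strip line = header ∧ capturing = false then
      pvALoop header rest true (captured ++ [line])
        (PySem.Str.len line - PySem.Str.len (PySem.Str.lstrip line))
    else if capturing then
      let current_indent : Int :=
        if PySem.Str.strip line ≠ "" then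
          PySem.Str.len line - PySem.Str.len (PySem.Str.lstrip line)
        else indent_level + 1
      if PySem.Str.strip line ≠ "" ∧ current_indent ≤ indent_level then
        captured
      else
        pvALoop header rest capturing (captured ++ [line]) indent_level
    else
      pvALoop header rest capturing captured indent_level

def extract_schema_definition_py (lines : List String) (schema_name : String) : String :=
  let captured := pvALoop (schema_name ++ ":") lines false [] 0
  if captured.isEmpty then "" else PySem.Str.join "\n" captured

-- ===== PORT B =====
-- B's local helper `indent(line)`
def pvIndent (line : String) : Int :=
  PySem.Str.len line - PySem.Str.len (PySem.Str.lstrip line)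

-- B: comprehensions over enumerate compute all match indices and all stop indices; the block is a slice.
-- (lines[i] is always in range since i comes from enumerate; pyGetD ports the indexing exactly there.)
def extract_schema_definition_py_alt (lines : List String) (schema_name : String) : String :=
  let header := schema_name ++ ":"
  let hits := ((PySem.List.enumerate lines).filter
      (fun p => PySem.Str.strip p.2 == header)).map (·.1)
  match hits with
  | [] => ""
  | i :: _ =>
    let tail := PySem.List.slice lines (some (i + 1)) none
    let ind := pvIndent (PySem.List.pyGetD lines i "")
    let stops := ((PySem.List.enumerate tail).filter
        (fun p => !(PySem.Str.strip p.2 == "") && decide (pvIndent p.2 ≤ ind))).map (·.1)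
    let j : Int := match stops with | [] => (tail.length : Int) | k :: _ => k
    PySem.Str.join "\n" (PySem.List.pyGetD lines i "" :: PySem.List.slice tail none (some j))

-- ===== PRECONDITION & SPEC =====
def Spec_extract_schema_definition_py (lines : List String) (schema_name : String) (out : String) : Prop := out = extract_schema_definition_py_alt lines schema_name
instance (lines : List String) (schema_name : String) (out : String) : Decidable (Spec_extract_schema_definition_py lines schema_name out) := by unfold Spec_extract_schema_definition_py; infer_instance

-- ===== CLAIM (what is proved, stated in full; the proofs are below) =====
def Claim_equal_extract_schema_definition_py : Prop := ∀ (lines : List String) (schema_name : String), Dom_extract_schema_definition_py lines schema_name → Spec_extract_schema_definition_py lines schema_name (extract_schema_definition_py lines schema_name)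

-- ===== LEMMAS AND PROOFS =====

-- proof-side intermediate form: find the header line, then collect the block after it
def pvFindHeader (header : String) : List String → Option (String × List String)
  | [] => none
  | line :: rest =>
    if PySem.Str.strip line = header then some (line, rest) else pvFindHeader header rest

def pvCollect (indent : Int) : List String → List String
  | [] => []
  | line :: rest =>
    if PySem.Str.strip line ≠ "" ∧
        PySem.Str.len line - PySem.Str.len (PySem.Str.lstrip line) ≤ indent then []
    else line :: pvCollect indent rest

-- once A's loop is capturing, it appends exactly the collect phase
theorem pvALoop_capturing (header : String) (ls : List String) :
    ∀ (captured : List String) (indent : Int),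
    pvALoop header ls true captured indent = captured ++ pvCollect indent ls := by
  induction ls with
  | nil => intro captured indent; simp [pvALoop, pvCollect]
  | cons line rest ih =>
    intro captured indent
    by_cases hs : PySem.Str.strip line = ""
    · simp [pvALoop, pvCollect, hs, ih]
    · by_cases hle : (line.length : Int) ≤ indent + ((PySem.Chars.lstrip line.toList).length : Int)
      · simp [pvALoop, pvCollect, hs, hle]
      · simp [pvALoop, pvCollect, hs, hle, ih]

-- the search phase of A's loop is exactly find-then-collect
theorem pvALoop_search (header : String) (ls : List String) :
    pvALoop header ls false [] 0 =
      match pvFindHeader header ls with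
      | none => []
      | some (head, rest) =>
        head :: pvCollect (PySem.Str.len head - PySem.Str.len (PySem.Str.lstrip head)) rest := by
  induction ls with
  | nil => simp [pvALoop, pvFindHeader]
  | cons line rest ih =>
    by_cases h : PySem.Str.strip line = header
    · simp [pvALoop, pvFindHeader, h, pvALoop_capturing]
    · simp [pvALoop, pvFindHeader, h, ih]

-- the head of an enumerate-filter-map comprehension is findIdx? shifted by the start index
theorem pvEnumHead (q : String → Bool) (xs : List String) :
    ∀ (s : Int),
    (((PySem.List.enumerate xs s).filter (fun p => q p.2)).map (·.1)).head? =
      Option.map (fun n : Nat => s + (n : Int)) (xs.findIdx? q) := by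
  induction xs with
  | nil => intro s; simp [PySem.List.enumerate_nil, List.findIdx?_nil]
  | cons x xs ih =>
    intro s
    by_cases h : q x
    · simp [PySem.List.enumerate_cons, List.findIdx?_cons, h]
    · simp only [PySem.List.enumerate_cons, List.filter_cons, h, Bool.false_eq_true,
        if_false, List.findIdx?_cons, cond_eq_if, ih (s + 1)]
      cases xs.findIdx? q with
      | none => simp
      | some n => simp; push_cast; ring

-- pvFindHeader, expressed through findIdx?
theorem pvFindHeader_eq (header : String) (lines : List String) :
    pvFindHeader header lines =
      (lines.findIdx? (fun l => PySem.Str.strip l == header)).map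
        (fun n => (lines.getD n "", lines.drop (n + 1))) := by
  induction lines with
  | nil => simp [pvFindHeader, List.findIdx?_nil]
  | cons line rest ih =>
    by_cases h : PySem.Str.strip line = header
    · simp [pvFindHeader, List.findIdx?_cons, h]
    · simp only [pvFindHeader, h, if_false, List.findIdx?_cons, beq_iff_eq, h, cond_eq_if,
        Bool.false_eq_true, ih, ite_false]
      cases rest.findIdx? (fun l => PySem.Str.strip l == header) with
      | none => simp
      | some n => simp

-- take up to the first index where p holds = takeWhile (not p)
theorem pvTake_findIdx_getD {α : Type} (p : α → Bool) (l : List α) :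
    l.take ((l.findIdx? p).getD l.length) = l.takeWhile (fun x => !p x) := by
  induction l with
  | nil => simp
  | cons x xs ih =>
    by_cases h : p x
    · simp [List.findIdx?_cons, h, List.takeWhile_cons]
    · cases hfi : xs.findIdx? p with
      | none =>
        simp [List.findIdx?_cons, h, hfi, List.takeWhile_cons]
        simpa [hfi] using ih
      | some n =>
        simp [List.findIdx?_cons, h, hfi, List.takeWhile_cons]
        simpa [hfi] using ih

-- takeWhile with the negated stop predicate is exactly pvCollect
theorem pvTakeWhile_eq_collect (ind : Int) (tail : List String) :
    tail.takeWhile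
        (fun l => !(!(PySem.Str.strip l == "") && decide (pvIndent l ≤ ind))) =
      pvCollect ind tail := by
  induction tail with
  | nil => simp [pvCollect]
  | cons line rest ih =>
    simp only [List.takeWhile_cons, pvCollect]
    by_cases hs : PySem.Str.strip line = ""
    · rw [if_pos (by simp [hs]), if_neg (by simp [hs]), ih]
    · by_cases hle : pvIndent line ≤ ind
      · have hle' := hle
        unfold pvIndent at hle'
        rw [if_neg (by simp [hs, hle]), if_pos ⟨hs, hle'⟩]
      · have hle' := hle
        unfold pvIndent at hle'
        have hle2 := hle
        simp [pvIndent] at hle2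
        rw [if_pos (by simp [hs]; omega), if_neg (by simp [hs]; omega), ih]

-- taking up to the first stop index is exactly pvCollect
theorem pvTake_eq_collect (ind : Int) (tail : List String) :
    tail.take ((tail.findIdx?
        (fun l => !(PySem.Str.strip l == "") && decide (pvIndent l ≤ ind))).getD tail.length) =
      pvCollect ind tail := by
  rw [pvTake_findIdx_getD, pvTakeWhile_eq_collect]

-- ===== VERDICT (by name: the statement is the Claim_ definition above) =====
theorem extract_schema_definition_py_spec : Claim_equal_extract_schema_definition_py := by
  intro lines schema_name _
  unfold Spec_extract_schema_definition_py
  simp only [extract_schema_definition_py, extract_schema_definition_py_alt]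
  rw [pvALoop_search, pvFindHeader_eq]
  have hmatch := pvEnumHead (fun l => PySem.Str.strip l == (schema_name ++ ":")) lines 0
  cases hfi : lines.findIdx? (fun l => PySem.Str.strip l == (schema_name ++ ":")) with
  | none =>
    rw [hfi] at hmatch
    cases hm : ((PySem.List.enumerate lines).filter
        (fun p => PySem.Str.strip p.2 == (schema_name ++ ":"))).map (·.1) with
    | nil => simp
    | cons i t => rw [hm] at hmatch; simp at hmatch
  | some n =>
    rw [hfi] at hmatch
    cases hm : ((PySem.List.enumerate lines).filter
        (fun p => PySem.Str.strip p.2 == (schema_name ++ ":"))).map (·.1) with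
    | nil => rw [hm] at hmatch; simp at hmatch
    | cons i t =>
      rw [hm] at hmatch
      simp only [List.head?_cons, Option.map_some, Option.some.injEq] at hmatch
      have hi : i = (n : Int) := by omega
      subst hi
      simp only [Option.map_some]
      have h1 : ((n : Int) + 1) = ((n + 1 : Nat) : Int) := by push_cast; ring
      rw [h1, PySem.List.slice_from_natCast]
      simp only [PySem.List.pyGetD_natCast]
      have hstops := pvEnumHead
        (fun l => !(PySem.Str.strip l == "") && decide (pvIndent l ≤ pvIndent (lines.getD n "")))
        (lines.drop (n + 1)) 0
      cases hfs : (lines.drop (n + 1)).findIdx?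
          (fun l => !(PySem.Str.strip l == "") &&
            decide (pvIndent l ≤ pvIndent (lines.getD n ""))) with
      | none =>
        rw [hfs] at hstops
        cases hs : ((PySem.List.enumerate (lines.drop (n + 1))).filter
            (fun p => !(PySem.Str.strip p.2 == "") &&
              decide (pvIndent p.2 ≤ pvIndent (lines.getD n "")))).map (·.1) with
        | nil =>
          rw [PySem.List.slice_to_natCast]
          have ht := pvTake_eq_collect (pvIndent (lines.getD n "")) (lines.drop (n + 1))
          rw [hfs] at ht
          simp only [Option.getD_none] at ht
          rw [ht]
          simp [pvIndent]
        | cons k t' => rw [hs] at hstops; simp at hstops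
      | some m =>
        rw [hfs] at hstops
        cases hs : ((PySem.List.enumerate (lines.drop (n + 1))).filter
            (fun p => !(PySem.Str.strip p.2 == "") &&
              decide (pvIndent p.2 ≤ pvIndent (lines.getD n "")))).map (·.1) with
        | nil => rw [hs] at hstops; simp at hstops
        | cons k t' =>
          rw [hs] at hstops
          simp only [List.head?_cons, Option.map_some, Option.some.injEq] at hstops
          have hk : k = (m : Int) := by omega
          subst hk
          rw [PySem.List.slice_to_natCast]
          have ht := pvTake_eq_collect (pvIndent (lines.getD n "")) (lines.drop (n + 1))
          rw [hfs] at ht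
          simp only [Option.getD_some] at ht
          rw [ht]
          simp [pvIndent]
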